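-- pv_equiv track=rewrite | github.com/jonathanschaaij/aoc2021 | day13/code.py | createField
-- ===== SOURCE A (Python) =====
-- def createField(dots):
--     maxX = maxY = 0
--     for pos in dots:
--         if pos[0] > maxX:
--             maxX = pos[0]
--         if pos[1] > maxY:
--             maxY = pos[1]
--     field = []
--     for y in range(maxY + 1):
--         row = []
--         for x in range(maxX + 1):
--             row.append(False)
--         field.append(row)
--     for pos in dots:
--         field[pos[1]][pos[0]]= True
--     return field
-- ===== SOURCE B (Python) =====
-- def createField(dots):
--     height = 1 + max([0] + [p[1] for p in dots])
--     width = 1 + max([0] + [p[0] for p in dots])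
--     buckets = [[] for _ in range(height)]
--     for p in dots:
--         buckets[p[1]].append(p[0])
--     field = []
--     for xs in buckets:
--         row = [False] * width
--         for x in xs:
--             row[x] = True
--         field.append(row)
--     return field
-- ===== Notes on version B (the rewrite author's own statement) =====
-- stated objective: alternative
-- what changed: B replaces A's preallocate-grid-then-scatter strategy by a two-stage bucket construction: it first groups the dots into per-row buckets of column indices (an index built once over the dots), then materializes each row independently from its own bucket; bounds come from max over a list instead of A's two running maxima.
import Mathlib
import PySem

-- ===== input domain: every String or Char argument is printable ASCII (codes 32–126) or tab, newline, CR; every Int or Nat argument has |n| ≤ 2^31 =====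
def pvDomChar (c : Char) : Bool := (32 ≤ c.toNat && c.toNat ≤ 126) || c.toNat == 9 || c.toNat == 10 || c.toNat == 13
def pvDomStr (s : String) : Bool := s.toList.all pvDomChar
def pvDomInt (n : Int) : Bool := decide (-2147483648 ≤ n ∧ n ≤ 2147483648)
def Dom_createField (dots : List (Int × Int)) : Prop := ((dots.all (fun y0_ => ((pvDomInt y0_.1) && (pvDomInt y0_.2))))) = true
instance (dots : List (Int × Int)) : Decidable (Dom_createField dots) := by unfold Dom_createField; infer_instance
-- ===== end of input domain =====

-- B groups the dots into per-row buckets of column indices and then builds each row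
-- from its own bucket, instead of A's preallocate-whole-grid-then-scatter strategy
-- (objective: alternative).

-- ===== PORT A =====
-- first loop: two running maxima, both starting at 0
def pvMax2 (dots : List (Int × Int)) : Int × Int :=
  dots.foldl (fun m pos =>
    (if pos.1 > m.1 then pos.1 else m.1, if pos.2 > m.2 then pos.2 else m.2)) (0, 0)

-- second loop: append rows of appended False cells
def pvInitField (maxX maxY : Int) : List (List Bool) :=
  (PySem.List.pyRange 0 (maxY + 1) 1).foldl
    (fun field _ =>
      field ++ [(PySem.List.pyRange 0 (maxX + 1) 1).foldl (fun row _ => row ++ [false]) []])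
    []

-- third loop body: field[pos[1]][pos[0]] = True  (none = IndexError, excluded by Pre_)
def pvMark (field : List (List Bool)) (pos : Int × Int) : List (List Bool) :=
  match PySem.List.pyGet? field pos.2 with
  | none => field
  | some row =>
    match PySem.List.pySet? row pos.1 true with
    | none => field
    | some row' => PySem.List.pySetD field pos.2 row'

def createField (dots : List (Int × Int)) : List (List Bool) :=
  let m := pvMax2 dots
  dots.foldl pvMark (pvInitField m.1 m.2)

-- ===== PORT B =====
-- buckets[p[1]].append(p[0])  (none = IndexError, excluded by Pre_)
def pvAddDot (buckets : List (List Int)) (p : Int × Int) : List (List Int) :=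
  match PySem.List.pyGet? buckets p.2 with
  | none => buckets
  | some xs => PySem.List.pySetD buckets p.2 (xs ++ [p.1])

-- row[x] = True  (none = IndexError, excluded by Pre_)
def pvMarkCell (row : List Bool) (x : Int) : List Bool :=
  match PySem.List.pySet? row x true with
  | none => row
  | some r => r

def createField_alt (dots : List (Int × Int)) : List (List Bool) :=
  let height := 1 + (PySem.List.max? ((0 : Int) :: dots.map (fun p => p.2)) (fun v => v)).getD 0
  let width := 1 + (PySem.List.max? ((0 : Int) :: dots.map (fun p => p.1)) (fun v => v)).getD 0
  let buckets0 := (PySem.List.pyRange 0 height 1).map (fun _ => ([] : List Int))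
  let buckets := dots.foldl pvAddDot buckets0
  buckets.foldl
    (fun field xs => field ++ [xs.foldl pvMarkCell (List.replicate width.toNat false)]) []

-- ===== PRECONDITION & SPEC =====
-- Pre_ excludes exactly the inputs where A raises IndexError: a dot with a coordinate below
-- the negative-wrap range of the grid A allocates (its side lengths are the running maxima + 1).
def Pre_createField (dots : List (Int × Int)) : Prop :=
  ∀ p ∈ dots,
    -((dots.foldl (fun m q => max m q.1) 0) + 1) ≤ p.1 ∧
    -((dots.foldl (fun m q => max m q.2) 0) + 1) ≤ p.2
instance (dots : List (Int × Int)) : Decidable (Pre_createField dots) := by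
  unfold Pre_createField; infer_instance
def pvWitness_createField : (List (Int × Int)) := [(1, 0), (0, 2)]

def Spec_createField (dots : List (Int × Int)) (out : List (List Bool)) : Prop :=
  out = createField_alt dots
instance (dots : List (Int × Int)) (out : List (List Bool)) : Decidable (Spec_createField dots out) := by
  unfold Spec_createField; infer_instance

-- ===== CLAIM (what is proved, stated in full; the proofs are below) =====
def Claim_equal_createField : Prop :=
  ∀ (dots : List (Int × Int)), Dom_createField dots → Pre_createField dots →
    Spec_createField dots (createField dots)

-- ===== LEMMAS AND PROOFS =====

-- proof-only helpers
def pvCell (g : List (List Bool)) (iy ix : Nat) : Bool := ((g[iy]?.getD [])[ix]?).getD false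
def pvBuck (g : List (List Int)) (j : Nat) : List Int := (g[j]?).getD []
def pvMXd (dots : List (Int × Int)) : Int := dots.foldl (fun m q => max m q.1) 0
def pvMYd (dots : List (Int × Int)) : Int := dots.foldl (fun m q => max m q.2) 0
def pvInit2 (mX mY : Int) : List (List Bool) :=
  (PySem.List.pyRange 0 (mY + 1) 1).map
    (fun _ => (PySem.List.pyRange 0 (mX + 1) 1).map (fun _ => false))
-- the element index Python's wrapping subscript actually touches, as a Nat
def pvWrapN (i : Int) (n : Nat) : Nat := if 0 ≤ i then i.toNat else n - (-i).toNat

theorem pvMax2_eq (dots : List (Int × Int)) : pvMax2 dots = (pvMXd dots, pvMYd dots) := by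
  unfold pvMax2 pvMXd pvMYd
  rw [PySem.List.foldl_prod_mk (f := fun m (q : Int × Int) => if q.1 > m then q.1 else m)
      (g := fun m (q : Int × Int) => if q.2 > m then q.2 else m)]
  have h1 : (fun (m : Int) (q : Int × Int) => if q.1 > m then q.1 else m)
      = fun m q => max m q.1 := by
    funext m q; rw [max_def]; split_ifs <;> omega
  have h2 : (fun (m : Int) (q : Int × Int) => if q.2 > m then q.2 else m)
      = fun m q => max m q.2 := by
    funext m q; rw [max_def]; split_ifs <;> omega
  rw [h1, h2]

theorem pvInitField_eq (mX mY : Int) : pvInitField mX mY = pvInit2 mX mY := by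
  unfold pvInitField pvInit2
  rw [PySem.List.foldl_append_singleton_eq_map
        (f := fun (_ : Int) => (PySem.List.pyRange 0 (mX + 1) 1).foldl (fun row _ => row ++ [false]) [])]
  rw [PySem.List.foldl_append_singleton_eq_map (f := fun (_ : Int) => false)]
  simp

theorem pvIdx_wrap (n : Nat) (i : Int) (h1 : -(n : Int) ≤ i) (h2 : i < (n : Int)) :
    PySem.List.pyIdx? n i = some (pvWrapN i n) := by
  unfold PySem.List.pyIdx? pvWrapN
  split_ifs <;> rfl

theorem pvWrapN_lt (n : Nat) (i : Int) (_h0 : 0 < n) (h1 : -(n : Int) ≤ i) (h2 : i < (n : Int)) :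
    pvWrapN i n < n := by
  unfold pvWrapN; split_ifs <;> omega

theorem pvGet_wrap {α : Type} (xs : List α) (i : Int)
    (h1 : -(xs.length : Int) ≤ i) (h2 : i < (xs.length : Int))
    (hlt : pvWrapN i xs.length < xs.length) :
    PySem.List.pyGet? xs i = some (xs[pvWrapN i xs.length]'hlt) := by
  unfold PySem.List.pyGet?
  rw [pvIdx_wrap _ _ h1 h2]
  exact List.getElem?_eq_getElem hlt

theorem pvSetD_wrap {α : Type} (xs : List α) (i : Int) (v : α)
    (h1 : -(xs.length : Int) ≤ i) (h2 : i < (xs.length : Int)) :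
    PySem.List.pySetD xs i v = xs.set (pvWrapN i xs.length) v := by
  unfold PySem.List.pySetD PySem.List.pySet?
  rw [pvIdx_wrap _ _ h1 h2]
  rfl

theorem pvMark_eq (field : List (List Bool)) (p : Int × Int) (W : Nat)
    (hW : ∀ row ∈ field, row.length = W)
    (hy1 : -(field.length : Int) ≤ p.2) (hy2 : p.2 < (field.length : Int))
    (hx1 : -(W : Int) ≤ p.1) (hx2 : p.1 < (W : Int))
    (hyl : pvWrapN p.2 field.length < field.length) :
    pvMark field p = field.set (pvWrapN p.2 field.length)
      ((field[pvWrapN p.2 field.length]'hyl).set (pvWrapN p.1 W) true) := by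
  unfold pvMark
  have hg : PySem.List.pyGet? field p.2 = some (field[pvWrapN p.2 field.length]'hyl) :=
    pvGet_wrap field p.2 hy1 hy2 hyl
  simp only [hg]
  have hrl : (field[pvWrapN p.2 field.length]'hyl).length = W :=
    hW _ (List.getElem_mem hyl)
  have hs : PySem.List.pySet? (field[pvWrapN p.2 field.length]'hyl) p.1 true
      = some ((field[pvWrapN p.2 field.length]'hyl).set (pvWrapN p.1 W) true) := by
    unfold PySem.List.pySet?
    rw [hrl, pvIdx_wrap _ _ hx1 hx2]
    rfl
  simp only [hs]
  unfold PySem.List.pySetD PySem.List.pySet?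
  rw [hrl] at *
  rw [pvIdx_wrap _ _ hy1 hy2]
  rfl

theorem pvFold_cells (dots : List (Int × Int)) (W H : Nat) (hW0 : 0 < W) (hH0 : 0 < H) :
    ∀ (field : List (List Bool)),
      field.length = H →
      (∀ row ∈ field, row.length = W) →
      (∀ p ∈ dots, -(W : Int) ≤ p.1 ∧ p.1 < (W : Int) ∧ -(H : Int) ≤ p.2 ∧ p.2 < (H : Int)) →
      (dots.foldl pvMark field).length = H ∧
      (∀ row ∈ dots.foldl pvMark field, row.length = W) ∧
      ∀ iy ix : Nat, pvCell (dots.foldl pvMark field) iy ix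
        = (pvCell field iy ix || decide ((ix, iy) ∈
            dots.map (fun p => (pvWrapN p.1 W, pvWrapN p.2 H)))) := by
  induction dots with
  | nil => intro field hlen hWr _; exact ⟨hlen, hWr, by simp⟩
  | cons p rest ih =>
    intro field hlen hWr hb
    obtain ⟨h1, h2, h3, h4⟩ := hb p (List.mem_cons_self)
    have hy1 : -(field.length : Int) ≤ p.2 := by omega
    have hy2 : p.2 < (field.length : Int) := by omega
    have hyl : pvWrapN p.2 field.length < field.length := by
      apply pvWrapN_lt <;> omega
    have hwy : pvWrapN p.2 field.length = pvWrapN p.2 H := by rw [hlen]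
    have hm := pvMark_eq field p W hWr hy1 hy2 h1 h2 hyl
    rw [List.foldl_cons, hm]
    have hxl : pvWrapN p.1 W < W := pvWrapN_lt W p.1 hW0 h1 h2
    have hlen' : (field.set (pvWrapN p.2 field.length)
        ((field[pvWrapN p.2 field.length]'hyl).set (pvWrapN p.1 W) true)).length = H := by
      rw [List.length_set]; exact hlen
    have hW' : ∀ r ∈ field.set (pvWrapN p.2 field.length)
        ((field[pvWrapN p.2 field.length]'hyl).set (pvWrapN p.1 W) true), r.length = W := by
      intro r hr
      rcases List.mem_or_eq_of_mem_set hr with h | h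
      · exact hWr _ h
      · rw [h, List.length_set]; exact hWr _ (List.getElem_mem hyl)
    have hb' : ∀ q ∈ rest, -(W : Int) ≤ q.1 ∧ q.1 < (W : Int) ∧ -(H : Int) ≤ q.2 ∧ q.2 < (H : Int) :=
      fun q hq => hb q (List.mem_cons_of_mem _ hq)
    obtain ⟨L1, L2, L3⟩ := ih _ hlen' hW' hb'
    refine ⟨L1, L2, ?_⟩
    intro iy ix
    rw [L3]
    have key : pvCell (field.set (pvWrapN p.2 field.length)
          ((field[pvWrapN p.2 field.length]'hyl).set (pvWrapN p.1 W) true)) iy ix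
        = (pvCell field iy ix ||
            decide ((ix, iy) = (pvWrapN p.1 W, pvWrapN p.2 H))) := by
      unfold pvCell
      by_cases hiy : pvWrapN p.2 field.length = iy
      · subst hiy
        rw [List.getElem?_set, if_pos rfl, if_pos (by omega), Option.getD_some,
            List.getElem?_set, List.getElem?_eq_getElem hyl, Option.getD_some]
        by_cases hix : pvWrapN p.1 W = ix
        · subst hix
          rw [if_pos rfl, if_pos (by rw [hWr _ (List.getElem_mem hyl)]; omega), Option.getD_some]
          simp [← hwy]
        · rw [if_neg hix]
          have hd : ¬ ((ix, pvWrapN p.2 field.length) = (pvWrapN p.1 W, pvWrapN p.2 H)) := by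
            intro hcontra
            exact hix (congrArg Prod.fst hcontra).symm
          rw [decide_eq_false hd, Bool.or_false]
      · rw [List.getElem?_set, if_neg hiy]
        have hd : ¬ ((ix, iy) = (pvWrapN p.1 W, pvWrapN p.2 H)) := by
          intro hcontra
          apply hiy
          rw [hwy]
          exact (congrArg Prod.snd hcontra).symm
        rw [decide_eq_false hd, Bool.or_false]
    rw [key]
    simp only [List.map_cons, List.mem_cons, Bool.decide_or, Bool.or_assoc]

theorem pvMaxHead_eq (l : List Int) :
    (PySem.List.max? ((0 : Int) :: l) (fun v => v)).getD 0 = l.foldl max 0 := by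
  rw [PySem.List.max?_id_cons]
  rfl

theorem pvCell_init (mX mY : Int) (iy ix : Nat) : pvCell (pvInit2 mX mY) iy ix = false := by
  unfold pvCell pvInit2
  rw [List.getElem?_map]
  cases h : (PySem.List.pyRange 0 (mY + 1) 1)[iy]? with
  | none => rfl
  | some yv =>
    simp only [Option.map_some, Option.getD_some, List.getElem?_map]
    cases hx : (PySem.List.pyRange 0 (mX + 1) 1)[ix]? with
    | none => rfl
    | some xv => rfl

theorem pvMXd_foldl (dots : List (Int × Int)) : pvMXd dots = (dots.map (fun p => p.1)).foldl max 0 := by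
  unfold pvMXd; rw [List.foldl_map]

theorem pvMYd_foldl (dots : List (Int × Int)) : pvMYd dots = (dots.map (fun p => p.2)).foldl max 0 := by
  unfold pvMYd; rw [List.foldl_map]

-- B-side: the buckets fold groups the dots' x-coordinates by wrapped row index
theorem pvBuckets_spec (H : Nat) (hH0 : 0 < H) :
    ∀ (dots : List (Int × Int)) (g : List (List Int)), g.length = H →
      (∀ p ∈ dots, -(H : Int) ≤ p.2 ∧ p.2 < (H : Int)) →
      (dots.foldl pvAddDot g).length = H ∧
      ∀ j : Nat, pvBuck (dots.foldl pvAddDot g) j =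
        pvBuck g j ++ ((dots.filter (fun p => pvWrapN p.2 H == j)).map (fun p => p.1)) := by
  intro dots
  induction dots with
  | nil => intro g hlen _; exact ⟨hlen, by simp⟩
  | cons p rest ih =>
    intro g hlen hb
    obtain ⟨h3, h4⟩ := hb p (List.mem_cons_self)
    have hy1 : -(g.length : Int) ≤ p.2 := by omega
    have hy2 : p.2 < (g.length : Int) := by omega
    have hyl : pvWrapN p.2 g.length < g.length := by apply pvWrapN_lt <;> omega
    have hwy : pvWrapN p.2 g.length = pvWrapN p.2 H := by rw [hlen]
    have hstep : pvAddDot g p = g.set (pvWrapN p.2 g.length) ((g[pvWrapN p.2 g.length]'hyl) ++ [p.1]) := by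
      unfold pvAddDot
      rw [pvGet_wrap g p.2 hy1 hy2 hyl]
      exact pvSetD_wrap g p.2 _ hy1 hy2
    rw [List.foldl_cons, hstep]
    have hlen' : (g.set (pvWrapN p.2 g.length) ((g[pvWrapN p.2 g.length]'hyl) ++ [p.1])).length = H := by
      rw [List.length_set]; exact hlen
    obtain ⟨L1, L2⟩ := ih _ hlen' (fun q hq => hb q (List.mem_cons_of_mem _ hq))
    refine ⟨L1, ?_⟩
    intro j
    rw [L2]
    have hbuckset : pvBuck (g.set (pvWrapN p.2 g.length) ((g[pvWrapN p.2 g.length]'hyl) ++ [p.1])) j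
        = if pvWrapN p.2 H = j then pvBuck g j ++ [p.1] else pvBuck g j := by
      unfold pvBuck
      rw [List.getElem?_set]
      by_cases hj : pvWrapN p.2 g.length = j
      · rw [if_pos hj, if_pos (by omega), Option.getD_some, if_pos (by omega)]
        congr 1
        rw [← hj, List.getElem?_eq_getElem hyl, Option.getD_some]
      · rw [if_neg hj, if_neg (by omega)]
    rw [hbuckset, List.filter_cons]
    by_cases hj : pvWrapN p.2 H = j
    · rw [if_pos hj, if_pos (by simp [hj]), List.map_cons, List.append_assoc]
      rfl
    · rw [if_neg hj, if_neg (by simp [hj])]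

-- B-side: the inner row fold sets exactly the wrapped column indices of its bucket
theorem pvRow_cells (W : Nat) (hW0 : 0 < W) :
    ∀ (xs : List Int) (row : List Bool), row.length = W →
      (∀ x ∈ xs, -(W : Int) ≤ x ∧ x < (W : Int)) →
      (xs.foldl pvMarkCell row).length = W ∧
      ∀ ix : Nat, ((xs.foldl pvMarkCell row)[ix]?).getD false =
        (((row[ix]?).getD false) || decide (ix ∈ xs.map (fun x => pvWrapN x W))) := by
  intro xs
  induction xs with
  | nil => intro row hlen _; exact ⟨hlen, by simp⟩
  | cons x rest ih =>
    intro row hlen hb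
    obtain ⟨h1, h2⟩ := hb x (List.mem_cons_self)
    have hxl : pvWrapN x W < W := pvWrapN_lt W x hW0 h1 h2
    have hstep : pvMarkCell row x = row.set (pvWrapN x W) true := by
      unfold pvMarkCell PySem.List.pySet?
      rw [hlen, pvIdx_wrap _ _ h1 h2]
      rfl
    rw [List.foldl_cons, hstep]
    have hlen' : (row.set (pvWrapN x W) true).length = W := by
      rw [List.length_set]; exact hlen
    obtain ⟨L1, L2⟩ := ih _ hlen' (fun q hq => hb q (List.mem_cons_of_mem _ hq))
    refine ⟨L1, ?_⟩
    intro ix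
    rw [L2]
    have hset : (((row.set (pvWrapN x W) true)[ix]?).getD false)
        = (((row[ix]?).getD false) || decide (ix = pvWrapN x W)) := by
      rw [List.getElem?_set]
      by_cases hx : pvWrapN x W = ix
      · rw [if_pos hx, if_pos (by omega), Option.getD_some]
        simp [hx]
      · rw [if_neg hx]
        have : ¬ (ix = pvWrapN x W) := by omega
        simp [this]
    rw [hset]
    simp only [List.map_cons, List.mem_cons, Bool.decide_or, Bool.or_assoc]

-- ===== VERDICT (by name: the statement is the Claim_ definition above) =====
theorem createField_spec : Claim_equal_createField := by
  intro dots _ hpre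
  show createField dots = createField_alt dots
  have hMX0 : 0 ≤ pvMXd dots := by rw [pvMXd_foldl]; exact (PySem.List.le_foldl_max _ _).1
  have hMY0 : 0 ≤ pvMYd dots := by rw [pvMYd_foldl]; exact (PySem.List.le_foldl_max _ _).1
  have hMXle : ∀ p ∈ dots, p.1 ≤ pvMXd dots := by
    intro p hpm; rw [pvMXd_foldl]
    exact (PySem.List.le_foldl_max _ _).2 p.1 (List.mem_map_of_mem hpm)
  have hMYle : ∀ p ∈ dots, p.2 ≤ pvMYd dots := by
    intro p hpm; rw [pvMYd_foldl]
    exact (PySem.List.le_foldl_max _ _).2 p.2 (List.mem_map_of_mem hpm)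
  have hlow : ∀ p ∈ dots, -(pvMXd dots + 1) ≤ p.1 ∧ -(pvMYd dots + 1) ≤ p.2 := hpre
  have hWi : (((pvMXd dots + 1).toNat : Nat) : Int) = pvMXd dots + 1 := Int.toNat_of_nonneg (by omega)
  have hHi : (((pvMYd dots + 1).toNat : Nat) : Int) = pvMYd dots + 1 := Int.toNat_of_nonneg (by omega)
  have hinitlen : (pvInit2 (pvMXd dots) (pvMYd dots)).length = (pvMYd dots + 1).toNat := by
    unfold pvInit2; rw [List.length_map, PySem.List.length_pyRange_one]; omega
  have hinitW : ∀ row ∈ pvInit2 (pvMXd dots) (pvMYd dots), row.length = (pvMXd dots + 1).toNat := by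
    intro row hr
    unfold pvInit2 at hr
    obtain ⟨yv, _, hry⟩ := List.mem_map.mp hr
    rw [← hry, List.length_map, PySem.List.length_pyRange_one]; omega
  have hbounds : ∀ p ∈ dots, -(((pvMXd dots + 1).toNat : Nat) : Int) ≤ p.1 ∧
      p.1 < (((pvMXd dots + 1).toNat : Nat) : Int) ∧
      -(((pvMYd dots + 1).toNat : Nat) : Int) ≤ p.2 ∧
      p.2 < (((pvMYd dots + 1).toNat : Nat) : Int) := by
    intro p hpm
    have ha := hlow p hpm
    have hbx := hMXle p hpm
    have hby := hMYle p hpm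
    omega
  obtain ⟨L1, L2, L3⟩ := pvFold_cells dots ((pvMXd dots + 1).toNat) ((pvMYd dots + 1).toNat)
    (by omega) (by omega) (pvInit2 (pvMXd dots) (pvMYd dots)) hinitlen hinitW hbounds
  have hA : createField dots = dots.foldl pvMark (pvInit2 (pvMXd dots) (pvMYd dots)) := by
    simp [createField, pvMax2_eq, pvInitField_eq]
  -- B side
  have hBX : (PySem.List.max? ((0 : Int) :: dots.map (fun p => p.1)) (fun v => v)).getD 0 = pvMXd dots := by
    rw [pvMaxHead_eq, pvMXd_foldl]
  have hBY : (PySem.List.max? ((0 : Int) :: dots.map (fun p => p.2)) (fun v => v)).getD 0 = pvMYd dots := by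
    rw [pvMaxHead_eq, pvMYd_foldl]
  have hb0len : ((PySem.List.pyRange 0 (1 + pvMYd dots) 1).map (fun _ => ([] : List Int))).length
      = (pvMYd dots + 1).toNat := by
    rw [List.length_map, PySem.List.length_pyRange_one]; omega
  have hb0 : ∀ j : Nat, pvBuck ((PySem.List.pyRange 0 (1 + pvMYd dots) 1).map (fun _ => ([] : List Int))) j = [] := by
    intro j
    unfold pvBuck
    rw [List.getElem?_map]
    cases h : (PySem.List.pyRange 0 (1 + pvMYd dots) 1)[j]? with
    | none => rfl
    | some yv => rfl
  have hboundsB : ∀ p ∈ dots, -(((pvMYd dots + 1).toNat : Nat) : Int) ≤ p.2 ∧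
      p.2 < (((pvMYd dots + 1).toNat : Nat) : Int) := by
    intro p hpm; obtain ⟨_, _, c, d⟩ := hbounds p hpm; exact ⟨c, d⟩
  obtain ⟨B1, B2⟩ := pvBuckets_spec ((pvMYd dots + 1).toNat) (by omega) dots
    ((PySem.List.pyRange 0 (1 + pvMYd dots) 1).map (fun _ => ([] : List Int))) hb0len hboundsB
  have hB : createField_alt dots =
      (dots.foldl pvAddDot ((PySem.List.pyRange 0 (1 + pvMYd dots) 1).map (fun _ => ([] : List Int)))).map
        (fun xs => xs.foldl pvMarkCell (List.replicate (1 + pvMXd dots).toNat false)) := by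
    simp only [createField_alt, hBX, hBY]
    rw [PySem.List.foldl_append_singleton_eq_map
      (f := fun (xs : List Int) => List.foldl pvMarkCell (List.replicate (1 + pvMXd dots).toNat false) xs)]
    simp
  set W := (pvMXd dots + 1).toNat with hWdef
  set H := (pvMYd dots + 1).toNat with hHdef
  have hWW : (1 + pvMXd dots).toNat = W := by omega
  rw [hA, hB, hWW]
  set bk := dots.foldl pvAddDot ((PySem.List.pyRange 0 (1 + pvMYd dots) 1).map (fun _ => ([] : List Int))) with hbk
  -- bucket contents are bounded x-coordinates
  have hbkmem : ∀ j : Nat, ∀ x ∈ pvBuck bk j, -(W : Int) ≤ x ∧ x < (W : Int) := by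
    intro j x hx
    rw [B2 j, hb0 j, List.nil_append] at hx
    obtain ⟨p, hp, hpx⟩ := List.mem_map.mp hx
    obtain ⟨a, b, _, _⟩ := hbounds p (List.mem_of_mem_filter hp)
    omega
  apply List.ext_getElem
  · rw [L1, List.length_map, B1]
  intro iy hy1 hy2
  have hbkget : bk[iy]'(by rw [List.length_map] at hy2; exact hy2) = pvBuck bk iy := by
    unfold pvBuck
    rw [List.getElem?_eq_getElem, Option.getD_some]
  obtain ⟨R1, R2⟩ := pvRow_cells W (by omega) (pvBuck bk iy) (List.replicate W false)
    (by rw [List.length_replicate]) (hbkmem iy)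
  apply List.ext_getElem
  · rw [L2 _ (List.getElem_mem hy1), List.getElem_map, hbkget, R1]
  intro ix hx1 hx2
  have hAcell : (dots.foldl pvMark (pvInit2 (pvMXd dots) (pvMYd dots)))[iy][ix]
      = pvCell (dots.foldl pvMark (pvInit2 (pvMXd dots) (pvMYd dots))) iy ix := by
    unfold pvCell
    rw [List.getElem?_eq_getElem hy1, Option.getD_some,
        List.getElem?_eq_getElem hx1, Option.getD_some]
  have hixW : ix < W := by
    rw [List.getElem_map, hbkget, R1] at hx2; exact hx2
  have hBcell : ((bk.map (fun xs => xs.foldl pvMarkCell (List.replicate W false)))[iy][ix]'(by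
        rw [List.getElem_map, hbkget, R1]; exact hixW))
      = (((pvBuck bk iy).foldl pvMarkCell (List.replicate W false))[ix]?).getD false := by
    simp only [List.getElem_map, hbkget]
    rw [List.getElem?_eq_getElem (by rw [R1]; exact hixW), Option.getD_some]
  rw [hAcell, hBcell, L3, pvCell_init, R2, B2, hb0, List.nil_append]
  simp only [List.getElem?_replicate, if_pos hixW, Option.getD_some, Bool.false_or]
  congr 1
  simp only [List.mem_map, List.mem_filter, List.map_map, Function.comp, beq_iff_eq, Prod.ext_iff]
  exact propext ⟨fun ⟨a, ha, hx, hy⟩ => ⟨a, ⟨ha, hy⟩, hx⟩, fun ⟨a, ⟨ha, hy⟩, hx⟩ => ⟨a, ha, hx, hy⟩⟩
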